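-- pv_equiv track=rewrite | github.com/alanbuxton/syracuse-neo | topics/views.py | remove_not_needed_admin1s_from_individual_cells
-- ===== SOURCE A (Python) =====
-- def remove_not_needed_admin1s_from_individual_cells(all_industry_ids, cells):
--     cells_to_keep_full = []
--     for industry_id in (all_industry_ids + ["search_str"]):
--         relevant_cells = [(x,y) for x,y in cells if x == str(industry_id)]
--         relevant_geos = [x[1] for x in relevant_cells]
--         geos_to_keep = remove_not_needed_admin1s(relevant_geos)
--         industry_cells_to_keep = [(x,y) for x,y in relevant_cells if y in geos_to_keep]
--         cells_to_keep_full.extend(industry_cells_to_keep)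
--     return cells_to_keep_full
--
-- def remove_not_needed_admin1s(geo_codes):
--     geo_codes_as_set = set(geo_codes)
--     codes_with_admin1 = filter( lambda x: len(x) > 4, geo_codes)
--     for code_with_admin1 in codes_with_admin1:
--         country = code_with_admin1[:2]
--         if country in geo_codes_as_set:
--             geo_codes_as_set.remove(code_with_admin1)
--     return list(geo_codes_as_set)
-- ===== SOURCE B (Python) =====
-- def remove_not_needed_admin1s_from_individual_cells(all_industry_ids, cells):
--     # One pass to group geo codes by cell key, then one pass per industry id:
--     # a geo code is dropped iff it is longer than 4 chars and its 2-char
--     # country prefix also occurs among the same industry's geo codes.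
--     geos_by_key = {}
--     for x, y in cells:
--         geos_by_key.setdefault(x, []).append(y)
--     result = []
--     for industry_id in all_industry_ids + ["search_str"]:
--         key = str(industry_id)
--         geos = geos_by_key.get(key, [])
--         geo_set = set(geos)
--         for y in geos:
--             if not (len(y) > 4 and y[:2] in geo_set):
--                 result.append((key, y))
--     return result
-- ===== Notes on version B (the rewrite author's own statement) =====
-- stated objective: faster
-- what changed: B builds a key->geo-codes dict from the cells in one pass and then filters each industry's group against a precomputed geo set, instead of rescanning the entire cell list and rebuilding the per-industry lists for every industry id.
import Mathlib
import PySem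

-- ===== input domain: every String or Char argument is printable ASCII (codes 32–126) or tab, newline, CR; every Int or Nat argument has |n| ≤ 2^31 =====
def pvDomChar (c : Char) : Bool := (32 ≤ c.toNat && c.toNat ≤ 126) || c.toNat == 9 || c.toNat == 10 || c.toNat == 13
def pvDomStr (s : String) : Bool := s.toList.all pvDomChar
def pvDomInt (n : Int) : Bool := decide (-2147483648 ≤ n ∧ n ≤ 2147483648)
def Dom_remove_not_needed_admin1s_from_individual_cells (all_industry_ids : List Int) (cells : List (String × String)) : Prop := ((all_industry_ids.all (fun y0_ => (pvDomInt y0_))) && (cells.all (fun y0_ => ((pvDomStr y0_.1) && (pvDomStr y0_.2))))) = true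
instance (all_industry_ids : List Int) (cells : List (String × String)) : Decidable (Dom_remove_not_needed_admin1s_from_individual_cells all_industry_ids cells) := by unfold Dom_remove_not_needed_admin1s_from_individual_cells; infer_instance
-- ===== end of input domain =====

-- B groups cells by key into a dict in one pass and filters each group against a precomputed
-- geo set, instead of rescanning the whole cell list for every industry id (objective: faster).


-- ===== PORT A =====
-- Python's inner helper returns list(set); that list is consumed only by membership tests
-- (`y in geos_to_keep`), so the port carries the PySem.Set itself — exact, since membership
-- does not depend on Python's set iteration order.  `none` = the KeyError that
-- `geo_codes_as_set.remove` raises when the code was already removed (excluded by Pre_).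
def pvRnaLoop (s : PySem.Set String) (codes : List String) : Option (PySem.Set String) :=
  match codes with
  | [] => some s
  | code :: rest =>
    let country := PySem.Str.slice code none (some 2)
    if PySem.Set.contains s country then
      match PySem.Set.remove? s code with
      | some s' => pvRnaLoop s' rest
      | none => none            -- KeyError
    else pvRnaLoop s rest

def remove_not_needed_admin1s (geo_codes : List String) : Option (PySem.Set String) :=
  pvRnaLoop (PySem.Set.ofList geo_codes)
    (geo_codes.filter (fun x => decide (PySem.Str.len x > 4)))

def remove_not_needed_admin1s_from_individual_cells (all_industry_ids : List Int) (cells : List (String × String)) : List (String × String) :=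
  (all_industry_ids.map PySem.Int.toStr ++ ["search_str"]).foldl (fun cells_to_keep_full industry_id =>
    let relevant_cells := cells.filter (fun p => p.1 == industry_id)
    let relevant_geos := relevant_cells.map (fun p => p.2)
    match remove_not_needed_admin1s relevant_geos with
    | some geos_to_keep =>
        cells_to_keep_full ++ relevant_cells.filter (fun p => PySem.Set.contains geos_to_keep p.2)
    | none => cells_to_keep_full   -- KeyError aborts the Python run; unreachable under Pre_
    ) []

-- ===== PORT B =====
def remove_not_needed_admin1s_from_individual_cells_alt (all_industry_ids : List Int) (cells : List (String × String)) : List (String × String) :=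
  let geos_by_key := cells.foldl (fun d p => d.modify p.1 [] (fun l => l ++ [p.2])) PySem.Dict.empty
  (all_industry_ids.map PySem.Int.toStr ++ ["search_str"]).foldl (fun result key =>
    let geos := geos_by_key.getD key []
    let geo_set := PySem.Set.ofList geos
    geos.foldl (fun res y =>
      if !(decide (PySem.Str.len y > 4) && PySem.Set.contains geo_set (PySem.Str.slice y none (some 2))) then
        res ++ [(key, y)]
      else res) result
    ) []

-- ===== PRECONDITION & SPEC =====
-- Pre_ excludes exactly the inputs on which A raises KeyError: some industry's cell group
-- contains a geo code of length > 4, duplicated in that group, whose 2-char country prefix is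
-- also in the group (the second `set.remove` of that code raises).
def Pre_remove_not_needed_admin1s_from_individual_cells (all_industry_ids : List Int) (cells : List (String × String)) : Prop :=
  ∀ k ∈ (all_industry_ids.map PySem.Int.toStr ++ ["search_str"]),
    ∀ y ∈ (cells.filter (fun p => p.1 == k)).map (fun p => p.2),
      PySem.Str.len y > 4 →
      PySem.Str.slice y none (some 2) ∈ (cells.filter (fun p => p.1 == k)).map (fun p => p.2) →
      ((cells.filter (fun p => p.1 == k)).map (fun p => p.2)).count y ≤ 1
instance (all_industry_ids : List Int) (cells : List (String × String)) : Decidable (Pre_remove_not_needed_admin1s_from_individual_cells all_industry_ids cells) := by unfold Pre_remove_not_needed_admin1s_from_individual_cells; infer_instance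

def pvWitness_remove_not_needed_admin1s_from_individual_cells : List Int × (List (String × String)) :=
  ([1], [("1", "USNY"), ("1", "US"), ("search_str", "FRAB1"), ("search_str", "FR")])

def Spec_remove_not_needed_admin1s_from_individual_cells (all_industry_ids : List Int) (cells : List (String × String)) (out : List (String × String)) : Prop := out = remove_not_needed_admin1s_from_individual_cells_alt all_industry_ids cells
instance (all_industry_ids : List Int) (cells : List (String × String)) (out : List (String × String)) : Decidable (Spec_remove_not_needed_admin1s_from_individual_cells all_industry_ids cells out) := by unfold Spec_remove_not_needed_admin1s_from_individual_cells; infer_instance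

-- ===== CLAIM (what is proved, stated in full; the proofs are below) =====
def Claim_equal_remove_not_needed_admin1s_from_individual_cells : Prop := ∀ (all_industry_ids : List Int) (cells : List (String × String)), Dom_remove_not_needed_admin1s_from_individual_cells all_industry_ids cells → Pre_remove_not_needed_admin1s_from_individual_cells all_industry_ids cells → Spec_remove_not_needed_admin1s_from_individual_cells all_industry_ids cells (remove_not_needed_admin1s_from_individual_cells all_industry_ids cells)

-- ===== LEMMAS AND PROOFS =====

-- A geo code is "removable" w.r.t. a group's geo list iff Python's helper deletes it.
def pvRemovable (geos : List String) (y : String) : Prop :=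
  PySem.Str.len y > 4 ∧ PySem.Str.slice y none (some 2) ∈ geos

lemma pvSlice2_short (y : String) : ¬ PySem.Str.len (PySem.Str.slice y none (some 2)) > 4 := by
  have h : (PySem.Str.slice y none (some 2)).toList = y.toList.take 2 := by
    rw [PySem.Str.toList_slice, PySem.Chars.slice_eq_listSlice,
      PySem.List.slice_to y.toList (by norm_num : (0:Int) ≤ 2)]
    rfl
  have hlen : (y.toList.take 2).length ≤ 2 := List.length_take_le _ _
  rw [PySem.Str.len_eq, h]
  omega

lemma pvRnaLoop_spec (geos : List String)
    (hpre : ∀ y ∈ geos, pvRemovable geos y → geos.count y ≤ 1) :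
    ∀ (codes : List String) (s : PySem.Set String),
      codes.Sublist (geos.filter (fun x => decide (PySem.Str.len x > 4))) →
      (∀ y : String, y ∈ s ↔ (y ∈ geos ∧ (¬ pvRemovable geos y ∨ y ∈ codes))) →
      ∃ S, pvRnaLoop s codes = some S ∧
        ∀ y : String, y ∈ S ↔ (y ∈ geos ∧ ¬ pvRemovable geos y) := by
  intro codes
  induction codes with
  | nil =>
      intro s _ hs
      exact ⟨s, rfl, fun y => by simpa using hs y⟩
  | cons c rest ih =>
      intro s hsub hs
      have hcfilter : c ∈ geos.filter (fun x => decide (PySem.Str.len x > 4)) :=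
        hsub.subset (List.mem_cons_self ..)
      have hcgeos : c ∈ geos := (List.mem_filter.mp hcfilter).1
      have hclong : PySem.Str.len c > 4 := by
        simpa using (List.mem_filter.mp hcfilter).2
      have hrest : rest.Sublist (geos.filter (fun x => decide (PySem.Str.len x > 4))) :=
        List.sublist_of_cons_sublist hsub
      have hcountry_mem : PySem.Set.contains s (PySem.Str.slice c none (some 2)) = true ↔
          PySem.Str.slice c none (some 2) ∈ geos := by
        rw [show PySem.Set.contains s (PySem.Str.slice c none (some 2)) = true ↔
            PySem.Str.slice c none (some 2) ∈ s from by
          simp [PySem.Set.contains]]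
        rw [hs]
        constructor
        · exact fun h => h.1
        · intro h
          exact ⟨h, Or.inl (fun hr => pvSlice2_short c hr.1)⟩
      by_cases hctry : PySem.Str.slice c none (some 2) ∈ geos
      · -- country is in the group: c is removable and gets removed
        have hrem : pvRemovable geos c := ⟨hclong, hctry⟩
        have hcs : c ∈ s := (hs c).mpr ⟨hcgeos, Or.inr (List.mem_cons_self ..)⟩
        have hcontains : PySem.Set.contains s c = true := by
          simpa [PySem.Set.contains] using hcs
        have hnotrest : c ∉ rest := by
          have h1 : (c :: rest).count c ≤ geos.count c :=
            le_trans (hsub.count_le c) (List.filter_sublist.count_le c)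
          have h2 : geos.count c ≤ 1 := hpre c hcgeos hrem
          have h3 : rest.count c = 0 := by
            have : (c :: rest).count c = rest.count c + 1 := by simp
            omega
          exact List.count_eq_zero.mp h3
        have hstep : pvRnaLoop s (c :: rest) = pvRnaLoop (PySem.Set.discard s c) rest := by
          simp only [pvRnaLoop, hcountry_mem.mpr hctry, if_true, PySem.Set.remove?, hcontains]
        rw [hstep]
        apply ih _ hrest
        intro y
        by_cases hyc : y = c
        · subst hyc
          simp only [PySem.Set.discard, List.mem_filter]
          constructor
          · rintro ⟨-, h⟩; simp at h
          · rintro ⟨-, h⟩; exact absurd hrem (h.resolve_right hnotrest)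
        · have : y ∈ PySem.Set.discard s c ↔ y ∈ s := by
            simp only [PySem.Set.discard, List.mem_filter]
            constructor
            · exact fun h => h.1
            · intro h; refine ⟨h, ?_⟩; simp [hyc]
          rw [this, hs]
          simp [List.mem_cons, hyc]
      · -- country not in the group: skip; c is not removable
        have hnorem : ¬ pvRemovable geos c := fun hr => hctry hr.2
        have hstep : pvRnaLoop s (c :: rest) = pvRnaLoop s rest := by
          simp only [pvRnaLoop]
          rw [if_neg (fun h => hctry (hcountry_mem.mp h))]
        rw [hstep]
        apply ih _ hrest
        intro y
        rw [hs]
        by_cases hyc : y = c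
        · subst hyc; simp [hnorem]
        · simp [List.mem_cons, hyc]

lemma pvRna_spec (geos : List String)
    (hpre : ∀ y ∈ geos, pvRemovable geos y → geos.count y ≤ 1) :
    ∃ S, remove_not_needed_admin1s geos = some S ∧
      ∀ y : String, y ∈ S ↔ (y ∈ geos ∧ ¬ pvRemovable geos y) := by
  apply pvRnaLoop_spec geos hpre _ _ (List.Sublist.refl _)
  intro y
  rw [PySem.Set.mem_ofList]
  constructor
  · intro h
    refine ⟨h, ?_⟩
    by_cases hr : pvRemovable geos y
    · exact Or.inr (List.mem_filter.mpr ⟨h, by simpa using hr.1⟩)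
    · exact Or.inl hr
  · exact fun h => h.1

-- filtering pairs whose first component is constant = filtering the second components
lemma pvFilter_snd {k : String} (f : String × String → Bool) :
    ∀ (rel : List (String × String)), (∀ p ∈ rel, p.1 = k) →
      rel.filter f = ((rel.map (fun p => p.2)).filter (fun y => f (k, y))).map (fun y => (k, y)) := by
  intro rel
  induction rel with
  | nil => intro _; rfl
  | cons p rest ih =>
      intro h
      obtain ⟨a, b⟩ := p
      have hp : a = k := h (a, b) (List.mem_cons_self ..)
      subst hp
      have hrest := ih (fun x hx => h x (List.mem_cons_of_mem _ hx))
      by_cases hq : f (a, b)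
      · simp [hq, hrest]
      · simp [hq, hrest]

lemma pvStep_eq (cells : List (String × String)) (k : String)
    (hpre : ∀ y ∈ (cells.filter (fun p => p.1 == k)).map (fun p => p.2),
      PySem.Str.len y > 4 →
      PySem.Str.slice y none (some 2) ∈ (cells.filter (fun p => p.1 == k)).map (fun p => p.2) →
      ((cells.filter (fun p => p.1 == k)).map (fun p => p.2)).count y ≤ 1)
    (acc : List (String × String)) :
    (match remove_not_needed_admin1s ((cells.filter (fun p => p.1 == k)).map (fun p => p.2)) with
     | some geos_to_keep =>
         acc ++ (cells.filter (fun p => p.1 == k)).filter (fun p => PySem.Set.contains geos_to_keep p.2)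
     | none => acc)
    = acc ++ (((cells.filter (fun p => p.1 == k)).map (fun p => p.2)).filter
        (fun y => !(decide (PySem.Str.len y > 4) &&
          PySem.Set.contains (PySem.Set.ofList ((cells.filter (fun p => p.1 == k)).map (fun p => p.2)))
            (PySem.Str.slice y none (some 2))))).map (fun y => (k, y)) := by
  set geos := (cells.filter (fun p => p.1 == k)).map (fun p => p.2) with hgeos
  have hpre' : ∀ y ∈ geos, pvRemovable geos y → geos.count y ≤ 1 := by
    intro y hy hr
    exact hpre y hy hr.1 hr.2
  obtain ⟨S, hS, hmem⟩ := pvRna_spec geos hpre'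
  rw [hS]
  dsimp only
  have hfst : ∀ p ∈ cells.filter (fun p => p.1 == k), p.1 = k := by
    intro p hp
    have := (List.mem_filter.mp hp).2
    simpa using this
  rw [pvFilter_snd (fun p => PySem.Set.contains S p.2) _ hfst]
  congr 1
  congr 1
  apply List.filter_congr
  intro y hy
  have hyg : y ∈ geos := hy
  have h1 : PySem.Set.contains S y = true ↔ ¬ pvRemovable geos y := by
    rw [show PySem.Set.contains S y = true ↔ y ∈ S from by
      simp [PySem.Set.contains]]
    rw [hmem]
    exact ⟨fun h => h.2, fun h => ⟨hyg, h⟩⟩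
  have h2 : (!(decide (PySem.Str.len y > 4) &&
      PySem.Set.contains (PySem.Set.ofList geos) (PySem.Str.slice y none (some 2)))) = true ↔
      ¬ pvRemovable geos y := by
    simp [pvRemovable, PySem.Set.contains, PySem.Set.mem_ofList, -not_and, not_and_or]
  rw [Bool.eq_iff_iff, h1, h2]

-- ===== VERDICT (by name: the statement is the Claim_ definition above) =====
theorem remove_not_needed_admin1s_from_individual_cells_spec : Claim_equal_remove_not_needed_admin1s_from_individual_cells := by
  intro all_industry_ids cells _ hpre
  unfold Spec_remove_not_needed_admin1s_from_individual_cells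
  unfold remove_not_needed_admin1s_from_individual_cells
    remove_not_needed_admin1s_from_individual_cells_alt
  apply PySem.List.foldl_congr_mem
  intro acc k hk
  simp only []
  rw [PySem.Dict.getD_foldl_modify_append, PySem.Dict.getD_empty, List.nil_append,
    PySem.List.foldl_append_if]
  exact pvStep_eq cells k (hpre k hk) acc
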